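-- pv_equiv track=rewrite | github.com/clio-vega/proofs | verify_multiplicity_bundle.py | gl_n_dim
-- ===== SOURCE A (Python) =====
-- def gl_n_dim(partition, n):
--     """Dimension of GL_n irrep via hook-content formula."""
--     numer = 1
--     denom = 1
--     for i, row_len in enumerate(partition):
--         for j in range(row_len):
--             numer *= (n + j - i)
--             arm = row_len - j - 1
--             leg = sum(1 for r in range(i+1, len(partition)) if partition[r] > j)
--             denom *= (arm + leg + 1)
--     return numer // denom
-- ===== SOURCE B (Python) =====
-- def gl_n_dim(partition, n):
--     """Dimension of GL_n irrep via hook-content formula.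
--
--     Single backward pass: rows are processed bottom-up while a counter
--     cnt[j] maintains how many rows below the current one are longer than j,
--     so each leg length is a single O(1) lookup instead of a scan over rows.
--     """
--     cnt = {}
--     numer = 1
--     denom = 1
--     for i in range(len(partition) - 1, -1, -1):
--         row = partition[i]
--         for j in range(row):
--             leg = cnt.get(j, 0)
--             numer *= n + j - i
--             denom *= (row - j - 1) + leg + 1
--             cnt[j] = leg + 1
--     return numer // denom
-- ===== Notes on version B (the rewrite author's own statement) =====
-- stated objective: faster
-- what changed: Instead of rescanning all lower rows for every cell to get the leg length, B makes one backward pass over the rows maintaining a dict of column heights, so each leg is a single lookup.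
import Mathlib
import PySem

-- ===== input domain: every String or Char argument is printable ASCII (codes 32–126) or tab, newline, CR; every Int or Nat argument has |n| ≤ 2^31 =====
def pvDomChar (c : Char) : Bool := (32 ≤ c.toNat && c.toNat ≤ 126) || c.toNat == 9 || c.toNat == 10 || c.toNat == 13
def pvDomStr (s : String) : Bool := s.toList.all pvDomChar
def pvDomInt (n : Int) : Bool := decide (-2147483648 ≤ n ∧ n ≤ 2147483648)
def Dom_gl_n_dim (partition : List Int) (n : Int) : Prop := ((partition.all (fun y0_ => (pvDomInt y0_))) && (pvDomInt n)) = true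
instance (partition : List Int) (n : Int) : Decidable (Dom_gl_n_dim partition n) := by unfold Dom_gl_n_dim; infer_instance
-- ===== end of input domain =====

-- B replaces A's per-cell scan over the lower rows by one backward pass over the rows
-- that maintains a counter of column heights, so each leg length is a single lookup (objective: faster).

-- ===== PORT A =====
-- Literal port of A: for each cell (i, j), the leg is recomputed by scanning rows i+1..len-1.
-- partition[r] for r in range(i+1, len(partition)) is always in range, so pyGetD is exact here.
def gl_n_dim (partition : List Int) (n : Int) : Int :=
  let nd := (PySem.List.enumerate partition).foldl
    (fun (acc : Int × Int) (p : Int × Int) =>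
      (PySem.List.pyRange 0 p.2 1).foldl
        (fun (acc : Int × Int) (j : Int) =>
          let numer := acc.1 * (n + j - p.1)
          let arm := p.2 - j - 1
          let leg := (PySem.List.pyRange (p.1 + 1) ((partition.length : Int)) 1).foldl
            (fun (s : Int) (r : Int) => if PySem.List.pyGetD partition r 0 > j then s + 1 else s) 0
          (numer, acc.2 * (arm + leg + 1))) acc)
    (1, 1)
  PySem.Int.floordiv nd.1 nd.2

-- ===== PORT B =====
-- Literal port of B: rows bottom-up; cnt is the dict counter, leg = cnt.get(j, 0).
-- partition[i] for i in range(len-1, -1, -1) is always in range, so pyGetD is exact here.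
def gl_n_dim_alt (partition : List Int) (n : Int) : Int :=
  let st := (PySem.List.pyRange ((partition.length : Int) - 1) (-1) (-1)).foldl
    (fun (st : PySem.Dict Int Int × Int × Int) (i : Int) =>
      let row := PySem.List.pyGetD partition i 0
      (PySem.List.pyRange 0 row 1).foldl
        (fun (st : PySem.Dict Int Int × Int × Int) (j : Int) =>
          let leg := st.1.getD j 0
          let numer := st.2.1 * (n + j - i)
          let denom := st.2.2 * ((row - j - 1) + leg + 1)
          (st.1.insert j (leg + 1), numer, denom)) st)
    (PySem.Dict.empty, 1, 1)
  PySem.Int.floordiv st.2.1 st.2.2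

-- ===== PRECONDITION & SPEC =====
def Spec_gl_n_dim (partition : List Int) (n : Int) (out : Int) : Prop := out = gl_n_dim_alt partition n
instance (partition : List Int) (n : Int) (out : Int) : Decidable (Spec_gl_n_dim partition n out) := by unfold Spec_gl_n_dim; infer_instance

-- ===== CLAIM (what is proved, stated in full; the proofs are below) =====
def Claim_equal_gl_n_dim : Prop := ∀ (partition : List Int) (n : Int), Dom_gl_n_dim partition n → Spec_gl_n_dim partition n (gl_n_dim partition n)

-- ===== LEMMAS AND PROOFS =====

-- leg of a cell in column j: how many of the rows strictly below have length > j
def legCnt (rest : List Int) (j : Int) : Int := (rest.countP (fun x => decide (j < x)) : Int)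

-- per-row factor of the numerator / denominator (the reference value both ports reach)
def cellN (n i row : Int) : Int := ((PySem.List.pyRange 0 row 1).map (fun j => n + j - i)).prod
def cellD (row : Int) (rest : List Int) : Int :=
  ((PySem.List.pyRange 0 row 1).map (fun j => row - j - 1 + legCnt rest j + 1)).prod

def specND (n : Int) : Int → List Int → Int × Int
  | _, [] => (1, 1)
  | i, row :: rest =>
    (cellN n i row * (specND n (i + 1) rest).1, cellD row rest * (specND n (i + 1) rest).2)

-- the zeta-reduced loop bodies of the two ports, named so the proofs can rewrite with them
def aStep (partition : List Int) (n : Int) : Int × Int → Int × Int → Int × Int :=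
  fun acc p =>
    (PySem.List.pyRange 0 p.2 1).foldl
      (fun acc j =>
        (acc.1 * (n + j - p.1),
         acc.2 * (p.2 - j - 1 +
           (PySem.List.pyRange (p.1 + 1) ((partition.length : Int)) 1).foldl
             (fun s r => if PySem.List.pyGetD partition r 0 > j then s + 1 else s) 0 + 1))) acc

def bCell (n i row : Int) : PySem.Dict Int Int × Int × Int → Int → PySem.Dict Int Int × Int × Int :=
  fun st j =>
    (st.1.insert j (st.1.getD j 0 + 1), st.2.1 * (n + j - i),
     st.2.2 * (row - j - 1 + st.1.getD j 0 + 1))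

def bRow (partition : List Int) (n : Int) :
    PySem.Dict Int Int × Int × Int → Int → PySem.Dict Int Int × Int × Int :=
  fun st i =>
    (PySem.List.pyRange 0 (PySem.List.pyGetD partition i 0) 1).foldl
      (bCell n i (PySem.List.pyGetD partition i 0)) st

-- a multiplying foldl is the initial value times the product (loop shape of both ports)
theorem foldl_mul_map (f : Int → Int) (xs : List Int) (a : Int) :
    xs.foldl (fun s j => s * f j) a = a * (xs.map f).prod := by
  induction xs generalizing a with
  | nil => simp
  | cons x xs ih => simp only [List.foldl_cons, List.map_cons, List.prod_cons, ih (a * f x)]; ring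

-- A's inner scan over the rows below row i computes legCnt of the dropped suffix
theorem legA (partition : List Int) (i : Int) (hi : 0 ≤ i) (j : Int) :
    (PySem.List.pyRange (i + 1) ((partition.length : Int)) 1).foldl
      (fun (s : Int) (r : Int) => if PySem.List.pyGetD partition r 0 > j then s + 1 else s) 0
    = legCnt (partition.drop (i + 1).toNat) j := by
  rw [PySem.List.foldl_pyRange_pyGetD' partition 0
    (fun (s : Int) (v : Int) => if v > j then s + 1 else s) 0 (a := i + 1) (by omega)]
  rw [show (fun (s : Int) (v : Int) => if v > j then s + 1 else s)
      = (fun (acc : Int) (x : Int) => if (fun x => decide (j < x)) x = true then acc + 1 else acc)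
    from by funext s v; simp [gt_iff_lt]]
  rw [PySem.List.foldl_count_if (fun x => decide (j < x))]
  simp [legCnt]

-- A's inner loop over one row multiplies in exactly the row factors
theorem aInner (n i row : Int) (L : Int → Int) (acc : Int × Int) :
    (PySem.List.pyRange 0 row 1).foldl
      (fun (acc : Int × Int) (j : Int) =>
        (acc.1 * (n + j - i), acc.2 * (row - j - 1 + L j + 1))) acc
    = (acc.1 * ((PySem.List.pyRange 0 row 1).map (fun j => n + j - i)).prod,
       acc.2 * ((PySem.List.pyRange 0 row 1).map (fun j => row - j - 1 + L j + 1)).prod) := by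
  obtain ⟨a, b⟩ := acc
  rw [PySem.List.foldl_prod_mk (f := fun s j => s * (n + j - i))
    (g := fun s j => s * (row - j - 1 + L j + 1)), foldl_mul_map, foldl_mul_map]

theorem aOuter (partition : List Int) (n : Int) :
    ∀ (rows : List Int) (k : Nat) (acc : Int × Int), partition.drop k = rows →
    (PySem.List.enumerate rows (k : Int)).foldl (aStep partition n) acc
    = (acc.1 * (specND n k rows).1, acc.2 * (specND n k rows).2) := by
  intro rows
  induction rows with
  | nil => intro k acc _; simp [PySem.List.enumerate, specND]
  | cons row rest ih =>
    intro k acc h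
    have hd1 : partition.drop (k + 1) = rest := by
      have := congrArg (List.drop 1) h
      simpa [List.drop_drop, Nat.add_comm] using this
    rw [PySem.List.enumerate_cons, List.foldl_cons]
    have hstep : aStep partition n acc ((k : Int), row)
        = (acc.1 * cellN n k row, acc.2 * cellD row rest) := by
      unfold aStep
      simp only [legA partition (k : Int) (by positivity)]
      have ht : ((k : Int) + 1).toNat = k + 1 := by omega
      rw [ht, hd1, aInner]
      rfl
    rw [hstep]
    have hcast : ((k : Int) + 1) = ((k + 1 : Nat) : Int) := by push_cast; ring
    rw [hcast, ih (k + 1) _ hd1]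
    simp only [specND]
    rw [← hcast]
    simp only [Prod.mk.injEq]
    exact ⟨by ring, by ring⟩

-- B's inner loop: products accumulate the row factors, the counter advances by one row
theorem bInner (n i row : Int) (c : Int → Int) :
    ∀ (t : Nat) (j0 : Int) (d : PySem.Dict Int Int) (nu de : Int),
      j0 + t = row → 0 ≤ j0 →
      (∀ j, 0 ≤ j → d.getD j 0 = if j < j0 then c j + 1 else c j) →
      ((PySem.List.pyRange j0 row 1).foldl (bCell n i row) (d, nu, de)).2.1
        = nu * ((PySem.List.pyRange j0 row 1).map (fun j => n + j - i)).prod ∧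
      ((PySem.List.pyRange j0 row 1).foldl (bCell n i row) (d, nu, de)).2.2
        = de * ((PySem.List.pyRange j0 row 1).map (fun j => row - j - 1 + c j + 1)).prod ∧
      (∀ j, 0 ≤ j →
        ((PySem.List.pyRange j0 row 1).foldl (bCell n i row) (d, nu, de)).1.getD j 0
          = if j < row then c j + 1 else c j) := by
  intro t
  induction t with
  | zero =>
    intro j0 d nu de ht h0 hd
    have hjr : j0 = row := by push_cast at ht; omega
    subst hjr
    rw [PySem.List.pyRange_one_eq_nil le_rfl]
    exact ⟨by simp, by simp, fun j hj => hd j hj⟩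
  | succ t iht =>
    intro j0 d nu de ht h0 hd
    have hlt : j0 < row := by omega
    rw [PySem.List.pyRange_one_cons hlt, List.foldl_cons]
    simp only [List.map_cons, List.prod_cons]
    have hleg : d.getD j0 0 = c j0 := by
      have := hd j0 h0
      simpa using this
    have hbc : bCell n i row (d, nu, de) j0
        = (d.insert j0 (c j0 + 1), nu * (n + j0 - i), de * (row - j0 - 1 + c j0 + 1)) := by
      unfold bCell
      rw [hleg]
    rw [hbc]
    have hd' : ∀ j, 0 ≤ j →
        (d.insert j0 (c j0 + 1)).getD j 0 = if j < j0 + 1 then c j + 1 else c j := by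
      intro j hj
      rw [PySem.Dict.getD_insert]
      rcases eq_or_ne j j0 with rfl | hne
      · simp
      · rw [if_neg hne, hd j hj]
        by_cases hlt' : j < j0
        · rw [if_pos hlt', if_pos (by omega)]
        · rw [if_neg hlt', if_neg (by omega)]
    obtain ⟨h1, h2, h3⟩ := iht (j0 + 1) (d.insert j0 (c j0 + 1))
      (nu * (n + j0 - i)) (de * (row - j0 - 1 + c j0 + 1)) (by omega) (by omega) hd'
    refine ⟨?_, ?_, h3⟩
    · rw [h1]; ring
    · rw [h2]; ring

theorem bOuter (partition : List Int) (n : Int) :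
    ∀ (rows : List Int) (k : Nat), partition.drop k = rows →
    ((PySem.List.pyRange (k : Int) ((partition.length : Int)) 1).foldr
        (fun i st => bRow partition n st i) (PySem.Dict.empty, 1, 1)).2.1
      = (specND n k rows).1 ∧
    ((PySem.List.pyRange (k : Int) ((partition.length : Int)) 1).foldr
        (fun i st => bRow partition n st i) (PySem.Dict.empty, 1, 1)).2.2
      = (specND n k rows).2 ∧
    (∀ j : Int, 0 ≤ j →
      ((PySem.List.pyRange (k : Int) ((partition.length : Int)) 1).foldr
          (fun i st => bRow partition n st i) (PySem.Dict.empty, 1, 1)).1.getD j 0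
        = legCnt rows j) := by
  intro rows
  induction rows with
  | nil =>
    intro k h
    have hk : partition.length ≤ k := List.drop_eq_nil_iff.mp h
    rw [PySem.List.pyRange_one_eq_nil (by exact_mod_cast hk)]
    exact ⟨rfl, rfl, fun j hj => by simp [legCnt, PySem.Dict.getD_empty]⟩
  | cons row rest ih =>
    intro k h
    have hklt : k < partition.length := by
      by_contra hge
      rw [List.drop_eq_nil_iff.mpr (by omega)] at h
      simp at h
    have hd1 : partition.drop (k + 1) = rest := by
      have := congrArg (List.drop 1) h
      simpa [List.drop_drop, Nat.add_comm] using this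
    have hget : PySem.List.pyGetD partition (k : Int) 0 = row := by
      have hk0 : partition[k]? = some row := by
        have : (partition.drop k)[0]? = some row := by rw [h]; rfl
        simpa [List.getElem?_drop] using this
      rw [PySem.List.pyGetD_natCast, List.getD_eq_getElem?_getD, hk0]
      rfl
    rw [PySem.List.pyRange_one_cons (by exact_mod_cast hklt), List.foldr_cons]
    have hcast : ((k : Int) + 1) = ((k + 1 : Nat) : Int) := by push_cast; ring
    rw [hcast]
    obtain ⟨ih1, ih2, ih3⟩ := ih (k + 1) hd1
    set r := (PySem.List.pyRange ((k + 1 : Nat) : Int) ((partition.length : Int)) 1).foldr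
      (fun i st => bRow partition n st i) (PySem.Dict.empty, 1, 1) with hr
    rw [← hcast] at ih1 ih2
    have hrow : bRow partition n r (k : Int)
        = (PySem.List.pyRange 0 row 1).foldl (bCell n (k : Int) row) r := by
      unfold bRow
      rw [hget]
    rw [hrow]
    by_cases hpos : 0 < row
    · obtain ⟨h1, h2, h3⟩ := bInner n (k : Int) row (fun j => legCnt rest j) row.toNat 0
        r.1 r.2.1 r.2.2 (by omega) le_rfl
        (fun j hj => by rw [if_neg (by omega)]; exact ih3 j hj)
      refine ⟨?_, ?_, ?_⟩
      · rw [show (r.1, r.2.1, r.2.2) = r from rfl] at h1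
        rw [h1, ih1]
        simp only [specND, cellN]
        ring
      · rw [show (r.1, r.2.1, r.2.2) = r from rfl] at h2
        rw [h2, ih2]
        simp only [specND, cellD]
        ring
      · intro j hj
        rw [show (r.1, r.2.1, r.2.2) = r from rfl] at h3
        rw [h3 j hj, legCnt, legCnt, List.countP_cons]
        by_cases hjr : j < row
        · rw [if_pos hjr]
          simp [hjr]
        · rw [if_neg hjr]
          simp [hjr]
    · rw [PySem.List.pyRange_one_eq_nil (by omega), List.foldl_nil]
      have hcN : cellN n (k : Int) row = 1 := by
        rw [cellN, PySem.List.pyRange_one_eq_nil (by omega)]; rfl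
      have hcD : cellD row rest = 1 := by
        rw [cellD, PySem.List.pyRange_one_eq_nil (by omega)]; rfl
      refine ⟨by rw [ih1]; simp [specND, hcN], by rw [ih2]; simp [specND, hcD], ?_⟩
      intro j hj
      rw [ih3 j hj, legCnt, legCnt, List.countP_cons]
      have hdec : decide (j < row) = false := by simp; omega
      rw [hdec]
      simp

-- ===== VERDICT (by name: the statement is the Claim_ definition above) =====
theorem gl_n_dim_spec : Claim_equal_gl_n_dim := by
  intro partition n _
  show gl_n_dim partition n = gl_n_dim_alt partition n
  have hA := aOuter partition n partition 0 (1, 1) partition.drop_zero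
  have hB := bOuter partition n partition 0 partition.drop_zero
  simp only [Nat.cast_zero] at hA hB
  obtain ⟨hB1, hB2, _⟩ := hB
  simp only [gl_n_dim, gl_n_dim_alt]
  rw [show (fun (acc : Int × Int) (p : Int × Int) =>
      (PySem.List.pyRange 0 p.2 1).foldl
        (fun (acc : Int × Int) (j : Int) =>
          (acc.1 * (n + j - p.1),
           acc.2 * (p.2 - j - 1 +
             (PySem.List.pyRange (p.1 + 1) ((partition.length : Int)) 1).foldl
               (fun s r => if PySem.List.pyGetD partition r 0 > j then s + 1 else s) 0 + 1)))
        acc) = aStep partition n from rfl]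
  rw [hA]
  rw [show PySem.List.pyRange ((partition.length : Int) - 1) (-1) (-1)
      = (PySem.List.pyRange 0 ((partition.length : Int)) 1).reverse from by
    rw [PySem.List.pyRange_neg_one_eq_reverse]; norm_num]
  rw [List.foldl_reverse]
  rw [show (fun (i : Int) (st : PySem.Dict Int Int × Int × Int) =>
      (PySem.List.pyRange 0 (PySem.List.pyGetD partition i 0) 1).foldl
        (fun (st : PySem.Dict Int Int × Int × Int) (j : Int) =>
          (st.1.insert j (st.1.getD j 0 + 1), st.2.1 * (n + j - i),
           st.2.2 * (PySem.List.pyGetD partition i 0 - j - 1 + st.1.getD j 0 + 1))) st)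
      = (fun i st => bRow partition n st i) from rfl]
  rw [hB1, hB2]
  simp
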